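-- pv_equiv track=rewrite | github.com/Lucas-Wang-THU/A-novel-Approach-For-Pipeline-Generation-Using-Mixed-GA-and-Tree-Strategy | findpath_1.py | find_tr_passpoint
-- ===== SOURCE A (Python) =====
-- def find_tr_passpoint(treepoints, points):
--     #找到每一个点对应的分支
--     list_2 = []
--     for j in range(0, len(points)):
--         n = 0
--         distance = abs(points[j][0] - treepoints[0][0]) + abs(points[j][1] - treepoints[0][1])
--         for i in range(0, len(treepoints)):
--             dist = abs(points[j][0] - treepoints[i][0]) + abs(points[j][1] - treepoints[i][1])
--             if dist <= distance:
--                 n = i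
--                 distance = dist
--         list_2.append(n)
--     return list_2
-- ===== SOURCE B (Python) =====
-- def _last_nearest(treepoints, p):
--     # table of Manhattan distances, then locate the LAST index achieving the minimum
--     d = [abs(p[0] - t[0]) + abs(p[1] - t[1]) for t in treepoints]
--     m = min(d)
--     return len(d) - 1 - d[::-1].index(m)
--
-- def find_tr_passpoint(treepoints, points):
--     return [_last_nearest(treepoints, p) for p in points]
-- ===== Notes on version B (the rewrite author's own statement) =====
-- stated objective: alternative
-- what changed: A's fused single scan that keeps a running (index, distance) with a <=-tie-break is replaced by a per-point decomposition: build the full Manhattan-distance table, take its minimum, then locate the last index achieving it by searching the reversed table.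
-- outside the precondition, e.g. on find_tr_passpoint([], [(0, 0)]): A raises IndexError, B raises ValueError
import Mathlib
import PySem

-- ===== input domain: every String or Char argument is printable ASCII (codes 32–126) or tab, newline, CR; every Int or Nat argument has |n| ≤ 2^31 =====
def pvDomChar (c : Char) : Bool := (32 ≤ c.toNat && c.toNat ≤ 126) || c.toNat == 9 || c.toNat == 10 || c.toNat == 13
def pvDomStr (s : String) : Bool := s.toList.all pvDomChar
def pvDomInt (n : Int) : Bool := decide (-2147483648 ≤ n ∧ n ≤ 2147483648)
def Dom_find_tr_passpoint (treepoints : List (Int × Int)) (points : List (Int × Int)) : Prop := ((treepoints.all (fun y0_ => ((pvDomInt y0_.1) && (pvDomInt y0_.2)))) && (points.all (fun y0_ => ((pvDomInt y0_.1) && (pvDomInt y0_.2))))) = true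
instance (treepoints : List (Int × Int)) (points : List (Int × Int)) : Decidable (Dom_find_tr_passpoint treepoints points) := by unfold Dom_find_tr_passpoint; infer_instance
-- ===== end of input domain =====

-- B replaces A's fused running-min/index scan by a distance-table + min + reverse-search-for-last-index
-- decomposition (objective: alternative; same asymptotic cost).

-- ===== PORT A =====
-- literal transliteration of A: fused loop keeping a running (n, distance), `<=` moves the index forward on ties
def find_tr_passpoint (treepoints : List (Int × Int)) (points : List (Int × Int)) : List Int :=
  List.foldl (fun list_2 j =>
      let pj := PySem.List.pyGetD points j (0, 0)
      let t0 := PySem.List.pyGetD treepoints 0 (0, 0)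
      let nd :=
        List.foldl (fun nd i =>
            let ti := PySem.List.pyGetD treepoints i (0, 0)
            let dist := |pj.1 - ti.1| + |pj.2 - ti.2|
            if dist ≤ nd.2 then (i, dist) else nd)
          ((0 : Int), |pj.1 - t0.1| + |pj.2 - t0.2|)
          (PySem.List.pyRange 0 (PySem.List.len treepoints))
      list_2 ++ [nd.1])
    [] (PySem.List.pyRange 0 (PySem.List.len points))

-- ===== PORT B =====
-- _last_nearest of Source B: distance table d, its minimum m, then the last index achieving m
-- (d[::-1] ported as d.reverse — PySem.List.slice?_none_none_neg_one; d.index(m) always succeeds since m = min(d) ∈ d)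
def lastNearest (treepoints : List (Int × Int)) (p : Int × Int) : Int :=
  let d := treepoints.map (fun t => |p.1 - t.1| + |p.2 - t.2|)
  let m := (PySem.List.min? d (fun y => y)).getD 0
  PySem.List.len d - 1 - ((PySem.List.index? d.reverse m).getD 0 : Int)

def find_tr_passpoint_alt (treepoints : List (Int × Int)) (points : List (Int × Int)) : List Int :=
  points.map (lastNearest treepoints)

-- ===== PRECONDITION & SPEC =====
-- Pre_ excludes empty treepoints with nonempty points: there A raises IndexError (and B raises ValueError).
def Pre_find_tr_passpoint (treepoints : List (Int × Int)) (points : List (Int × Int)) : Prop :=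
  points ≠ [] → treepoints ≠ []
instance (treepoints : List (Int × Int)) (points : List (Int × Int)) : Decidable (Pre_find_tr_passpoint treepoints points) := by unfold Pre_find_tr_passpoint; infer_instance
def pvWitness_find_tr_passpoint : (List (Int × Int)) × (List (Int × Int)) := ([(0, 0), (2, 1)], [(1, 1), (3, 0)])
def Spec_find_tr_passpoint (treepoints : List (Int × Int)) (points : List (Int × Int)) (out : List Int) : Prop := out = find_tr_passpoint_alt treepoints points
instance (treepoints : List (Int × Int)) (points : List (Int × Int)) (out : List Int) : Decidable (Spec_find_tr_passpoint treepoints points out) := by unfold Spec_find_tr_passpoint; infer_instance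

-- ===== CLAIM (what is proved, stated in full; the proofs are below) =====
def Claim_equal_find_tr_passpoint : Prop := ∀ (treepoints : List (Int × Int)) (points : List (Int × Int)), Dom_find_tr_passpoint treepoints points → Pre_find_tr_passpoint treepoints points → Spec_find_tr_passpoint treepoints points (find_tr_passpoint treepoints points)

-- ===== LEMMAS AND PROOFS =====

theorem min_getD_append (d : List Int) (x : Int) (h : d ≠ []) :
    (PySem.List.min? (d ++ [x]) (fun y => y)).getD 0
      = min ((PySem.List.min? d (fun y => y)).getD 0) x := by
  obtain ⟨a, b, rfl⟩ := List.exists_cons_of_ne_nil h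
  rw [List.cons_append, PySem.List.min?_id_cons, PySem.List.min?_id_cons]
  simp [List.foldl_append]

theorem min_getD_mem (d : List Int) (h : d ≠ []) :
    (PySem.List.min? d (fun y => y)).getD 0 ∈ d := by
  obtain ⟨a, b, rfl⟩ := List.exists_cons_of_ne_nil h
  rw [PySem.List.min?_id_cons]
  simpa using PySem.List.min?_mem (xs := a :: b) (key := fun y => y) (m := b.foldl min a)
    (by rw [PySem.List.min?_id_cons])

theorem inner_eq (p : Int × Int) :
    ∀ (tps : List (Int × Int)), tps ≠ [] →
    List.foldl (fun nd i =>
        if |p.1 - (PySem.List.pyGetD tps i (0, 0)).1| + |p.2 - (PySem.List.pyGetD tps i (0, 0)).2| ≤ nd.2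
        then (i, |p.1 - (PySem.List.pyGetD tps i (0, 0)).1| + |p.2 - (PySem.List.pyGetD tps i (0, 0)).2|)
        else nd)
      ((0 : Int), |p.1 - (PySem.List.pyGetD tps 0 (0, 0)).1| + |p.2 - (PySem.List.pyGetD tps 0 (0, 0)).2|)
      (PySem.List.pyRange 0 (PySem.List.len tps))
    = (lastNearest tps p,
       (PySem.List.min? (tps.map (fun t => |p.1 - t.1| + |p.2 - t.2|)) (fun y => y)).getD 0) := by
  intro tps
  induction tps using List.reverseRecOn with
  | nil => intro h; exact absurd rfl h
  | append_singleton l t ih =>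
    intro _
    by_cases hl : l = []
    · subst hl
      have hr : PySem.List.pyRange 0 (PySem.List.len ([t] : List (Int × Int))) = [(0 : Int)] := by
        have h1 : PySem.List.len ([t] : List (Int × Int)) = 1 := by simp
        rw [h1]; decide
      simp only [List.nil_append, hr, List.foldl_cons, List.foldl_nil]
      have hg : PySem.List.pyGetD [t] 0 ((0:Int), (0:Int)) = t := by simp [pysem]
      rw [hg]
      simp [lastNearest, PySem.List.min?_id_cons]
    · -- l ≠ []: split the range, rewrite the prefix back to l, apply ih, then case on the new distance
      have hn : (0:Int) ≤ (l.length : Int) := by positivity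
      have hlen : PySem.List.len (l ++ [t]) = (l.length : Int) + 1 := by simp
      rw [hlen, PySem.List.pyRange_one_succ_right hn, List.foldl_append]
      -- init index-0 lookup agrees with l's
      have h0 : PySem.List.pyGetD (l ++ [t]) 0 ((0:Int),(0:Int)) = PySem.List.pyGetD l 0 ((0:Int),(0:Int)) := by
        have hlp : 0 < l.length := List.length_pos_iff.mpr hl
        rw [PySem.List.pyGetD_eq_getElem _ _ (le_refl 0) (by exact_mod_cast Nat.lt_of_lt_of_le hlp (by simp)),
            PySem.List.pyGetD_eq_getElem _ _ (le_refl 0) (by exact_mod_cast hlp)]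
        exact List.getElem_append_left ..
      have hcongr : ∀ (nd : Int × Int), ∀ i ∈ PySem.List.pyRange 0 (l.length : Int),
          (if |p.1 - (PySem.List.pyGetD (l ++ [t]) i (0, 0)).1| + |p.2 - (PySem.List.pyGetD (l ++ [t]) i (0, 0)).2| ≤ nd.2
           then (i, |p.1 - (PySem.List.pyGetD (l ++ [t]) i (0, 0)).1| + |p.2 - (PySem.List.pyGetD (l ++ [t]) i (0, 0)).2|)
           else nd)
          = (if |p.1 - (PySem.List.pyGetD l i (0, 0)).1| + |p.2 - (PySem.List.pyGetD l i (0, 0)).2| ≤ nd.2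
             then (i, |p.1 - (PySem.List.pyGetD l i (0, 0)).1| + |p.2 - (PySem.List.pyGetD l i (0, 0)).2|)
             else nd) := by
        intro nd i hi
        obtain ⟨hi0, hi1⟩ := PySem.List.mem_pyRange_one.mp hi
        have hg : PySem.List.pyGetD (l ++ [t]) i ((0:Int),(0:Int)) = PySem.List.pyGetD l i ((0:Int),(0:Int)) := by
          rw [PySem.List.pyGetD_eq_getElem _ _ hi0 (by simp; omega),
              PySem.List.pyGetD_eq_getElem _ _ hi0 (by exact_mod_cast hi1)]
          exact List.getElem_append_left ..
        rw [hg]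
      have hih := ih hl
      simp only [PySem.List.len_eq] at hih
      have hinner := PySem.List.foldl_congr_mem (PySem.List.pyRange 0 (l.length : Int)) _ _
        ((0 : Int), |p.1 - (PySem.List.pyGetD l 0 ((0:Int),(0:Int))).1| + |p.2 - (PySem.List.pyGetD l 0 ((0:Int),(0:Int))).2|) hcongr
      rw [h0, hinner, hih]
      -- the appended step reads t
      have hgt : PySem.List.pyGetD (l ++ [t]) (l.length : Int) ((0:Int),(0:Int)) = t := by
        rw [PySem.List.pyGetD_eq_getElem _ _ hn (by simp)]
        simp
      rw [List.foldl_cons, List.foldl_nil, hgt]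
      set dt := |p.1 - t.1| + |p.2 - t.2| with hdt
      set d := l.map (fun t => |p.1 - t.1| + |p.2 - t.2|) with hd
      have hdne : d ≠ [] := by simp [hd, hl]
      set m := (PySem.List.min? d (fun y => y)).getD 0 with hm
      have hmap : (l ++ [t]).map (fun t => |p.1 - t.1| + |p.2 - t.2|) = d ++ [dt] := by simp [hd, hdt]
      have hmin' : (PySem.List.min? ((l ++ [t]).map (fun t => |p.1 - t.1| + |p.2 - t.2|)) (fun y => y)).getD 0
          = min m dt := by rw [hmap]; exact min_getD_append d dt hdne
      have hrev : (d ++ [dt]).reverse = dt :: d.reverse := by simp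
      by_cases hle : dt ≤ m
      · have hmindt : min m dt = dt := min_eq_right hle
        rw [if_pos hle, hmin', hmindt]
        have hln : lastNearest (l ++ [t]) p = (l.length : Int) := by
          simp only [lastNearest]
          rw [hmap, min_getD_append d dt hdne, hmindt, hrev, PySem.List.index?_cons_self]
          simp [hd]
        rw [hln]
      · have hlt : m < dt := lt_of_not_ge hle
        have hminm : min m dt = m := min_eq_left hlt.le
        rw [if_neg hle, hmin', hminm]
        have hmem : m ∈ d.reverse := List.mem_reverse.mpr (min_getD_mem d hdne)
        obtain ⟨k, hk⟩ := Option.isSome_iff_exists.mp ((PySem.List.index?_isSome_iff _ _).mpr hmem)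
        have hln : lastNearest (l ++ [t]) p = lastNearest l p := by
          simp only [lastNearest]
          rw [hmap, min_getD_append d dt hdne, hminm, hrev,
              PySem.List.index?_cons_of_ne _ (ne_of_gt hlt), hk]
          simp only [hd, Option.map_some, Option.getD_some, PySem.List.len_eq, List.length_append,
            List.length_cons, List.length_nil, List.length_map]
          push_cast
          ring
        rw [hln]

-- ===== VERDICT (by name: the statement is the Claim_ definition above) =====
theorem find_tr_passpoint_spec : Claim_equal_find_tr_passpoint := by
  unfold Claim_equal_find_tr_passpoint
  intro treepoints points _ hpre
  unfold Spec_find_tr_passpoint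
  by_cases hpts : points = []
  · subst hpts
    simp [find_tr_passpoint, find_tr_passpoint_alt, PySem.List.pyRange]
  · have htps : treepoints ≠ [] := hpre hpts
    simp only [find_tr_passpoint, find_tr_passpoint_alt]
    rw [PySem.List.foldl_pyRange_zero_pyGetD points ((0:Int),(0:Int))
        (fun acc q =>
          acc ++ [(List.foldl (fun nd i =>
              if |q.1 - (PySem.List.pyGetD treepoints i (0, 0)).1| + |q.2 - (PySem.List.pyGetD treepoints i (0, 0)).2| ≤ nd.2
              then (i, |q.1 - (PySem.List.pyGetD treepoints i (0, 0)).1| + |q.2 - (PySem.List.pyGetD treepoints i (0, 0)).2|)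
              else nd)
            ((0 : Int), |q.1 - (PySem.List.pyGetD treepoints 0 (0, 0)).1| + |q.2 - (PySem.List.pyGetD treepoints 0 (0, 0)).2|)
            (PySem.List.pyRange 0 (PySem.List.len treepoints))).1]) [],
        PySem.List.foldl_append_singleton_eq_map]
    simp only [List.nil_append]
    exact List.map_congr_left (fun q _ => congrArg Prod.fst (inner_eq q treepoints htps))
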